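-- pv_equiv track=rewrite | github.com/harikrishnancj/Python_ | tuff.py | ds_multof_pfs
-- ===== SOURCE A (Python) =====
-- def divisors_sum(n):
--     """Calculate the sum of divisors of a number."""
--     sum_divisors = 0
--     for i in range(1, n + 1):
--         if n % i == 0:
--             sum_divisors += i
--     return sum_divisors
--
-- def prime_factors_sum(n):
--     """Calculate the sum of prime factors of a number with multiplicities."""
--     sum_factors = 0
--     divisor = 2
--     while divisor * divisor <= n:
--         while n % divisor == 0:
--             sum_factors += divisor
--             n //= divisor
--         divisor += 1
--     if n > 1:  # If n is a prime number greater than 1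
--         sum_factors += n
--     return sum_factors
--
-- def ds_multof_pfs(nMin, nMax):
--     """Find numbers in the range [nMin, nMax] where the sum of divisors is divisible by the sum of prime factors."""
--     result = []
--     for n in range(nMin, nMax + 1):
--         sum_div = divisors_sum(n)
--         sum_prime_factors = prime_factors_sum(n)
--
--         if sum_div % sum_prime_factors == 0:
--             result.append(n)
--
--     return result
-- ===== SOURCE B (Python) =====
-- def divisors_sum(n):
--     """Sum of divisors via sqrt pairing: each divisor i <= sqrt(n) pairs with n//i."""
--     total = 0
--     i = 1
--     while i * i <= n:
--         if n % i == 0: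
--             j = n // i
--             total += i
--             if j != i:
--                 total += j
--         i += 1
--     return total
--
-- def prime_factors_sum(n):
--     """Sum of prime factors with multiplicity: strip 2s, then try only odd divisors."""
--     total = 0
--     while n % 2 == 0:
--         total += 2
--         n //= 2
--     d = 3
--     while d * d <= n:
--         while n % d == 0:
--             total += d
--             n //= d
--         d += 2
--     if n > 1:
--         total += n
--     return total
--
-- def ds_multof_pfs(nMin, nMax):
--     """Find numbers in [nMin, nMax] where sum of divisors is divisible by sum of prime factors."""
--     return [n for n in range(nMin, nMax + 1)
--             if divisors_sum(n) % prime_factors_sum(n) == 0]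
-- ===== Notes on version B (the rewrite author's own statement) =====
-- stated objective: faster
-- what changed: B computes each divisor sum by pairing divisors up to sqrt(n) (adding i and n//i) instead of scanning all of 1..n, and its prime-factor sum strips factors of 2 first and then tries only odd trial divisors.
import Mathlib
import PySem

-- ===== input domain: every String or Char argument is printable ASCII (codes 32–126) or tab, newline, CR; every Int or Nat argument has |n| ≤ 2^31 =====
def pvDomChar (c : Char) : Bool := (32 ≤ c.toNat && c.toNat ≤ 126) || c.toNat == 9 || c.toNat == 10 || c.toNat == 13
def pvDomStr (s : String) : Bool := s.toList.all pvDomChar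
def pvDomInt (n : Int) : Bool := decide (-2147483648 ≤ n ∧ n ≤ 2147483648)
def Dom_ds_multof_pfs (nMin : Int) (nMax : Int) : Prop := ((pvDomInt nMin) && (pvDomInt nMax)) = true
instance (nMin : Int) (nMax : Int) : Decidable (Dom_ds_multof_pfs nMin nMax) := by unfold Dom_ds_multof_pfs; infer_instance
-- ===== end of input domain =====

-- B replaces A's O(n) divisor-sum scan by √n divisor pairing and strips the factor 2
-- before trying only odd trial divisors (objective: faster, asymptotic in the divisor sum).

-- ===== PORT A =====

-- A.divisors_sum: for i in range(1, n+1): if n % i == 0: sum += i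
def pvDivSumA (n : Int) : Int :=
  (PySem.List.pyRange 1 (n + 1)).foldl
    (fun s i => if PySem.Int.mod n i == 0 then s + i else s) 0

-- A.prime_factors_sum's nested whiles, flattened to one step-for-step loop:
-- while divisor*divisor <= n: if n % divisor == 0 divide out, else divisor += 1.
-- The '2 ≤ d' conjunct is a totality guard only: d starts at 2 and only increases.
def pvPfsLoopA (n : Int) (d : Int) (acc : Int) : Int :=
  if h : 2 ≤ d ∧ d * d ≤ n then
    if PySem.Int.mod n d = 0 then pvPfsLoopA (PySem.Int.floordiv n d) d (acc + d)
    else pvPfsLoopA n (d + 1) acc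
  else acc + (if 1 < n then n else 0)
termination_by (n - d).toNat
decreasing_by
  · have h4 : (2:Int) * d ≤ d * d := by nlinarith [h.1]
    have hq : PySem.Int.floordiv n d < n := by
      have hn : 0 < n := by nlinarith [h.1]
      have : PySem.Int.floordiv n d = ((n.toNat / d.toNat : Nat) : Int) := by
        have h1 : n = ((n.toNat : Nat) : Int) := by omega
        have h2 : d = ((d.toNat : Nat) : Int) := by omega
        conv_lhs => rw [h1, h2]
        rw [PySem.Int.floordiv_natCast]
      rw [this]
      have : n.toNat / d.toNat < n.toNat := Nat.div_lt_self (by omega) (by omega)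
      omega
    omega
  · have h4 : (2:Int) * d ≤ d * d := by nlinarith [h.1]
    omega

def pvPfsA (n : Int) : Int := pvPfsLoopA n 2 0

def ds_multof_pfs (nMin : Int) (nMax : Int) : List Int :=
  (PySem.List.pyRange nMin (nMax + 1)).foldl
    (fun res n => if (PySem.Int.mod (pvDivSumA n) (pvPfsA n) == 0) then res ++ [n] else res) []

-- ===== PORT B =====

-- B.divisors_sum: while i*i <= n: if n % i == 0: add i and (if different) its cofactor n//i.
-- The '1 ≤ i' conjunct is a totality guard only: i starts at 1 and only increases.
def pvDivSumLoopB (n : Int) (i : Int) (total : Int) : Int :=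
  if h : 1 ≤ i ∧ i * i ≤ n then
    pvDivSumLoopB n (i + 1)
      (if PySem.Int.mod n i = 0 then
        (let j := PySem.Int.floordiv n i
         let t := total + i
         if j ≠ i then t + j else t)
       else total)
  else total
termination_by (n + 1 - i).toNat
decreasing_by
  have : i ≤ n := by nlinarith [h.1, h.2]
  omega

def pvDivSumB (n : Int) : Int := pvDivSumLoopB n 1 0

-- B.prime_factors_sum, first loop: while n % 2 == 0: total += 2; n //= 2.
-- The '1 ≤ n' conjunct is a totality guard only: every call keeps n ≥ 1.
def pvTwoLoopB (n : Int) (total : Int) : Int × Int :=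
  if h : 1 ≤ n ∧ PySem.Int.mod n 2 = 0 then
    pvTwoLoopB (PySem.Int.floordiv n 2) (total + 2)
  else (n, total)
termination_by n.toNat
decreasing_by
  have hd : (2:Int) ∣ n := (PySem.Int.mod_eq_zero_iff_dvd n 2).mp h.2
  have hn2 : 2 ≤ n := by omega
  have : PySem.Int.floordiv n 2 = ((n.toNat / 2 : Nat) : Int) := by
    have h1 : n = ((n.toNat : Nat) : Int) := by omega
    conv_lhs => rw [h1]
    exact_mod_cast PySem.Int.floordiv_natCast n.toNat 2
  rw [this]
  have : n.toNat / 2 < n.toNat := Nat.div_lt_self (by omega) (by omega)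
  omega

-- B.prime_factors_sum, odd loop, flattened exactly like A's ('3 ≤ d' is a totality guard).
def pvPfsLoopB (n : Int) (d : Int) (acc : Int) : Int :=
  if h : 3 ≤ d ∧ d * d ≤ n then
    if PySem.Int.mod n d = 0 then pvPfsLoopB (PySem.Int.floordiv n d) d (acc + d)
    else pvPfsLoopB n (d + 2) acc
  else acc + (if 1 < n then n else 0)
termination_by (n - d).toNat
decreasing_by
  · have h4 : (2:Int) * d ≤ d * d := by nlinarith [h.1]
    have hq : PySem.Int.floordiv n d < n := by
      have hn : 0 < n := by nlinarith [h.1]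
      have : PySem.Int.floordiv n d = ((n.toNat / d.toNat : Nat) : Int) := by
        have h1 : n = ((n.toNat : Nat) : Int) := by omega
        have h2 : d = ((d.toNat : Nat) : Int) := by omega
        conv_lhs => rw [h1, h2]
        rw [PySem.Int.floordiv_natCast]
      rw [this]
      have : n.toNat / d.toNat < n.toNat := Nat.div_lt_self (by omega) (by omega)
      omega
    omega
  · have h4 : (2:Int) * d ≤ d * d := by nlinarith [h.1]
    omega

def pvPfsB (n : Int) : Int :=
  let p := pvTwoLoopB n 0
  pvPfsLoopB p.1 3 p.2

def ds_multof_pfs_alt (nMin : Int) (nMax : Int) : List Int :=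
  (PySem.List.pyRange nMin (nMax + 1)).filter
    (fun n => PySem.Int.mod (pvDivSumB n) (pvPfsB n) == 0)

-- ===== PRECONDITION & SPEC =====
-- Pre_ excludes exactly the inputs where A raises: for any n ≤ 1 in the (nonempty) range,
-- prime_factors_sum(n) = 0 and 'sum_div % 0' raises ZeroDivisionError in Python.
def Pre_ds_multof_pfs (nMin : Int) (nMax : Int) : Prop := 2 ≤ nMin ∨ nMax < nMin
instance (nMin : Int) (nMax : Int) : Decidable (Pre_ds_multof_pfs nMin nMax) := by
  unfold Pre_ds_multof_pfs; infer_instance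

def pvWitness_ds_multof_pfs : Int × Int := (2, 30)

def Spec_ds_multof_pfs (nMin : Int) (nMax : Int) (out : List Int) : Prop := out = ds_multof_pfs_alt nMin nMax
instance (nMin : Int) (nMax : Int) (out : List Int) : Decidable (Spec_ds_multof_pfs nMin nMax out) := by unfold Spec_ds_multof_pfs; infer_instance

-- ===== CLAIM (what is proved, stated in full; the proofs are below) =====
def Claim_equal_ds_multof_pfs : Prop := ∀ (nMin : Int) (nMax : Int), Dom_ds_multof_pfs nMin nMax → Pre_ds_multof_pfs nMin nMax → Spec_ds_multof_pfs nMin nMax (ds_multof_pfs nMin nMax)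

-- ===== LEMMAS AND PROOFS =====

-- ---- divisor sum: A's full scan equals the Icc 1 m sum ----
lemma pvDivSumA_aux (m : Nat) (k : Nat) :
    (PySem.List.pyRange 1 ((k : Int) + 1)).foldl
        (fun s i => if PySem.Int.mod (m : Int) i == 0 then s + i else s) 0
      = ((∑ d ∈ Finset.Icc 1 k, if d ∣ m then d else 0 : Nat) : Int) := by
  induction k with
  | zero =>
    norm_num
  | succ k ih =>
    have hc : ((k + 1 : Nat) : Int) + 1 = ((k : Int) + 1) + 1 := by push_cast; ring
    rw [hc, PySem.List.pyRange_one_succ_right (by omega : (1:Int) ≤ (k : Int) + 1)]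
    rw [List.foldl_append, ih]
    have hcast : ((k : Int) + 1) = ((k + 1 : Nat) : Int) := by push_cast; ring
    simp only [List.foldl_cons, List.foldl_nil, hcast, PySem.Int.mod_natCast]
    rw [Finset.sum_Icc_succ_top (by omega : 1 ≤ k + 1)]
    by_cases hdvd : (k + 1) ∣ m
    · have hmod : m % (k + 1) = 0 := Nat.dvd_iff_mod_eq_zero.mp hdvd
      simp only [hmod, Nat.cast_zero, beq_self_eq_true, if_true, if_pos hdvd]
      push_cast; ring
    · have hmod : m % (k + 1) ≠ 0 := fun h => hdvd (Nat.dvd_of_mod_eq_zero h)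
      have hf : (((m % (k + 1) : Nat) : Int) == 0) = false := by
        apply beq_false_of_ne
        exact_mod_cast hmod
      simp only [hf, Bool.false_eq_true, if_false, if_neg hdvd, add_zero]

lemma pvDivSumA_eq_sum (m : Nat) :
    pvDivSumA (m : Int) = ((∑ d ∈ Finset.Icc 1 m, if d ∣ m then d else 0 : Nat) : Int) := by
  unfold pvDivSumA
  exact pvDivSumA_aux m m

-- ---- the √-pairing identity over Nat ----
lemma pv_sqrt_sq_le (m : Nat) : Nat.sqrt m * Nat.sqrt m ≤ m := by
  have := Nat.sqrt_le' m
  nlinarith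

lemma pv_div_le_sqrt (m b : Nat) (hb : b ∣ m) (hbs : Nat.sqrt m < b) :
    m / b ≤ Nat.sqrt m := by
  have h1 : m / b ≤ m / (Nat.sqrt m + 1) := Nat.div_le_div_left (by omega) (by omega)
  have h2 : m / (Nat.sqrt m + 1) < Nat.sqrt m + 1 :=
    (Nat.div_lt_iff_lt_mul (by omega)).mpr (Nat.lt_succ_sqrt m)
  omega

lemma pv_big_div_of_small (m b : Nat) (hm : 1 ≤ m) (hb : b ∣ m) (hbs : b ≤ Nat.sqrt m)
    (hne : m / b ≠ b) : ¬ (m / b ≤ Nat.sqrt m) := by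
  intro hqs
  have hb1 : 1 ≤ b := Nat.pos_of_dvd_of_pos hb (by omega)
  have heq : b * (m / b) = m := Nat.mul_div_cancel' hb
  have hq1 : 1 ≤ m / b := Nat.one_le_div_iff (by omega) |>.mpr (Nat.le_of_dvd (by omega) hb)
  have hs1 : 1 ≤ Nat.sqrt m := le_trans hb1 hbs
  have hss : Nat.sqrt m * Nat.sqrt m ≤ m := pv_sqrt_sq_le m
  have h1 : b * (m / b) ≤ Nat.sqrt m * (m / b) := Nat.mul_le_mul_right _ hbs
  have h2 : Nat.sqrt m * (m / b) ≤ Nat.sqrt m * Nat.sqrt m := Nat.mul_le_mul_left _ hqs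
  have e2 : Nat.sqrt m * (m / b) = Nat.sqrt m * Nat.sqrt m := le_antisymm h2 (by omega)
  have eq1 : m / b = Nat.sqrt m := Nat.eq_of_mul_eq_mul_left (by omega) e2
  have e3 : b * (m / b) = Nat.sqrt m * (m / b) := by omega
  have eq2 : b = Nat.sqrt m := Nat.eq_of_mul_eq_mul_right (by omega) e3
  exact hne (by omega)

lemma pv_filter_small (m : Nat) (hm : 1 ≤ m) :
    Finset.filter (· ∣ m) (Finset.Icc 1 (Nat.sqrt m))
      = Finset.filter (· ≤ Nat.sqrt m) m.divisors := by
  ext x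
  simp only [Finset.mem_filter, Finset.mem_Icc, Nat.mem_divisors]
  constructor
  · rintro ⟨⟨h1, h2⟩, h3⟩
    exact ⟨⟨h3, by omega⟩, h2⟩
  · rintro ⟨⟨h1, h2⟩, h3⟩
    exact ⟨⟨Nat.pos_of_dvd_of_pos h1 (by omega), h3⟩, h1⟩

lemma pv_pairing_key (m : Nat) (hm : 1 ≤ m) :
    (∑ d ∈ Finset.Icc 1 m, if d ∣ m then d else 0)
      = ∑ j ∈ Finset.Icc 1 (Nat.sqrt m),
          (if j ∣ m then j + (if m / j ≠ j then m / j else 0) else 0) := by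
  have hm0 : m ≠ 0 := by omega
  -- LHS is the sum over all divisors
  have hLHS : (∑ d ∈ Finset.Icc 1 m, if d ∣ m then d else 0) = ∑ d ∈ m.divisors, d := by
    rw [← Finset.sum_filter]
    congr 1
  -- RHS is the sum over the small divisors of (j + paired cofactor)
  have hRHS : (∑ j ∈ Finset.Icc 1 (Nat.sqrt m),
        (if j ∣ m then j + (if m / j ≠ j then m / j else 0) else 0))
      = ∑ j ∈ Finset.filter (· ≤ Nat.sqrt m) m.divisors,
          (j + (if m / j ≠ j then m / j else 0)) := by
    rw [← Finset.sum_filter, pv_filter_small m hm]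
  -- the big divisors are in bijection with the small strict divisors via d ↦ m / d
  have hbij : (∑ d ∈ Finset.filter (fun d => ¬ d ≤ Nat.sqrt m) m.divisors, d)
      = ∑ j ∈ Finset.filter (fun j => j ≤ Nat.sqrt m ∧ m / j ≠ j) m.divisors, m / j := by
    apply Finset.sum_nbij' (fun d => m / d) (fun j => m / j)
    · intro a ha
      simp only [Finset.mem_filter, Nat.mem_divisors, not_le] at ha ⊢
      obtain ⟨⟨hdvd, -⟩, hgt⟩ := ha
      have ha1 : 1 ≤ a := Nat.pos_of_dvd_of_pos hdvd (by omega)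
      refine ⟨⟨Nat.div_dvd_of_dvd hdvd, hm0⟩, pv_div_le_sqrt m a hdvd hgt, ?_⟩
      rw [Nat.div_div_self hdvd hm0]
      have := pv_div_le_sqrt m a hdvd hgt
      omega
    · intro b hb
      simp only [Finset.mem_filter, Nat.mem_divisors, not_le] at hb ⊢
      obtain ⟨⟨hdvd, -⟩, hle, hne⟩ := hb
      refine ⟨⟨Nat.div_dvd_of_dvd hdvd, hm0⟩, ?_⟩
      have := pv_big_div_of_small m b hm hdvd hle hne
      omega
    · intro a ha
      simp only [Finset.mem_filter, Nat.mem_divisors] at ha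
      exact Nat.div_div_self ha.1.1 hm0
    · intro b hb
      simp only [Finset.mem_filter, Nat.mem_divisors] at hb
      exact Nat.div_div_self hb.1.1 hm0
    · intro a ha
      simp only [Finset.mem_filter, Nat.mem_divisors] at ha
      exact (Nat.div_div_self ha.1.1 hm0).symm
  -- assemble
  rw [hLHS, hRHS]
  rw [← Finset.sum_filter_add_sum_filter_not m.divisors (fun d => d ≤ Nat.sqrt m) (fun d => d)]
  rw [hbij, Finset.sum_add_distrib]
  congr 1
  rw [← Finset.filter_filter (fun j => j ≤ Nat.sqrt m) (fun j => m / j ≠ j) m.divisors,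
      Finset.sum_filter]

-- ---- divisor sum: B's loop equals the Icc u (sqrt m) sum ----
lemma pvDivSumLoopB_stop (m : Nat) (u : Nat) (hgt : Nat.sqrt m < u) (total : Int) :
    pvDivSumLoopB (m : Int) (u : Int) total = total := by
  rw [pvDivSumLoopB, dif_neg]
  rintro ⟨-, hle⟩
  have hlt : m < u * u := by
    have := Nat.sqrt_lt'.mp hgt
    nlinarith
  have hlt' : (m : Int) < (u : Int) * (u : Int) := by exact_mod_cast hlt
  linarith

lemma pvDivSumLoopB_aux (m : Nat) (k : Nat) (u : Nat) (hu : 1 ≤ u)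
    (hk : Nat.sqrt m + 1 - u ≤ k) (total : Int) :
    pvDivSumLoopB (m : Int) (u : Int) total
      = total + ((∑ j ∈ Finset.Icc u (Nat.sqrt m),
          (if j ∣ m then j + (if m / j ≠ j then m / j else 0) else 0) : Nat) : Int) := by
  induction k generalizing u total with
  | zero =>
    have hgt : Nat.sqrt m < u := by omega
    rw [pvDivSumLoopB_stop m u hgt, Finset.Icc_eq_empty (by omega), Finset.sum_empty]
    simp
  | succ k ih =>
    by_cases hle : u ≤ Nat.sqrt m
    · have hguard : (1:Int) ≤ (u:Int) ∧ (u:Int) * (u:Int) ≤ (m:Int) := by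
        constructor
        · exact_mod_cast hu
        · exact_mod_cast Nat.le_sqrt.mp hle
      rw [pvDivSumLoopB, dif_pos hguard]
      have hcast : ((u:Int) + 1) = ((u + 1 : Nat) : Int) := by push_cast; ring
      rw [hcast, ih (u + 1) (by omega) (by omega)]
      have hins : Finset.Icc u (Nat.sqrt m) = insert u (Finset.Icc (u + 1) (Nat.sqrt m)) :=
        (Finset.insert_Icc_add_one_left_eq_Icc hle).symm
      rw [hins, Finset.sum_insert (by simp : u ∉ Finset.Icc (u + 1) (Nat.sqrt m))]
      simp only [PySem.Int.mod_natCast, PySem.Int.floordiv_natCast]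
      have hmodc : (((m % u : Nat)) : Int) = 0 ↔ u ∣ m := by
        rw [Nat.cast_eq_zero]
        exact Nat.dvd_iff_mod_eq_zero.symm
      by_cases hdvd : u ∣ m
      · rw [if_pos (hmodc.mpr hdvd), if_pos hdvd]
        by_cases hne : m / u = u
        · rw [if_neg (by simp [hne] : ¬ ((m / u : Nat) : Int) ≠ ((u : Nat) : Int)),
              if_neg (by simp [hne] : ¬ m / u ≠ u)]
          push_cast; ring
        · rw [if_pos (by exact_mod_cast hne : ((m / u : Nat) : Int) ≠ ((u : Nat) : Int)),
              if_pos hne]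
          push_cast; ring
      · rw [if_neg (fun h => hdvd (hmodc.mp h)), if_neg hdvd]
        push_cast; ring
    · have hgt : Nat.sqrt m < u := by omega
      rw [pvDivSumLoopB_stop m u hgt, Finset.Icc_eq_empty (by omega), Finset.sum_empty]
      simp

lemma pvDivSumLoopB_eq_sum (m : Nat) (u : Nat) (hu : 1 ≤ u) (total : Int) :
    pvDivSumLoopB (m : Int) (u : Int) total
      = total + ((∑ j ∈ Finset.Icc u (Nat.sqrt m),
          (if j ∣ m then j + (if m / j ≠ j then m / j else 0) else 0) : Nat) : Int) := by
  exact pvDivSumLoopB_aux m (Nat.sqrt m + 1 - u) u hu (le_refl _) total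

lemma pvDivSum_eq (n : Int) (hn : 2 ≤ n) : pvDivSumA n = pvDivSumB n := by
  obtain ⟨m, rfl⟩ : ∃ m : Nat, n = (m : Int) := ⟨n.toNat, by omega⟩
  have hm : 1 ≤ m := by exact_mod_cast le_trans (by norm_num : (1:Int) ≤ 2) hn
  rw [pvDivSumA_eq_sum m, pv_pairing_key m hm]
  unfold pvDivSumB
  have h1 : (1 : Int) = ((1 : Nat) : Int) := by norm_num
  rw [h1, pvDivSumLoopB_eq_sum m 1 le_rfl 0, zero_add]

-- ---- prime-factor sum ----
lemma pvTwoLoopB_spec_aux (k : Nat) : ∀ (n acc : Int), n.toNat ≤ k → 1 ≤ n →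
    1 ≤ (pvTwoLoopB n acc).1 ∧ ¬ (2 ∣ (pvTwoLoopB n acc).1) := by
  induction k with
  | zero => intro n acc hk hn; omega
  | succ k ih =>
    intro n acc hk hn
    rw [pvTwoLoopB]
    by_cases hc : 1 ≤ n ∧ PySem.Int.mod n 2 = 0
    · rw [dif_pos hc]
      have hdvd : (2:Int) ∣ n := (PySem.Int.mod_eq_zero_iff_dvd n 2).mp hc.2
      have hfd : PySem.Int.floordiv n 2 = n / 2 := PySem.Int.floordiv_eq_ediv_of_pos (by norm_num)
      rw [hfd]
      exact ih (n / 2) (acc + 2) (by omega) (by omega)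
    · rw [dif_neg hc]
      have hmod : PySem.Int.mod n 2 ≠ 0 := fun h => hc ⟨hn, h⟩
      exact ⟨hn, fun hdvd => hmod ((PySem.Int.mod_eq_zero_iff_dvd n 2).mpr hdvd)⟩

lemma pvTwoLoopB_spec (n : Int) (acc : Int) (hn : 1 ≤ n) :
    1 ≤ (pvTwoLoopB n acc).1 ∧ ¬ (2 ∣ (pvTwoLoopB n acc).1) :=
  pvTwoLoopB_spec_aux n.toNat n acc le_rfl hn

lemma pvPfsA_two_phase_aux (k : Nat) : ∀ (n acc : Int), n.toNat ≤ k → 1 ≤ n →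
    pvPfsLoopA n 2 acc = pvPfsLoopA (pvTwoLoopB n acc).1 3 (pvTwoLoopB n acc).2 := by
  induction k with
  | zero => intro n acc hk hn; omega
  | succ k ih =>
    intro n acc hk hn
    by_cases hdvd : (2:Int) ∣ n
    · have hmod : PySem.Int.mod n 2 = 0 := (PySem.Int.mod_eq_zero_iff_dvd n 2).mpr hdvd
      have hfd : PySem.Int.floordiv n 2 = n / 2 := PySem.Int.floordiv_eq_ediv_of_pos (by norm_num)
      rw [pvTwoLoopB, dif_pos ⟨hn, hmod⟩]
      by_cases h4 : 4 ≤ n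
      · rw [pvPfsLoopA, dif_pos ⟨by norm_num, by norm_num; omega⟩, if_pos hmod]
        rw [hfd]
        exact ih (n / 2) (acc + 2) (by omega) (by omega)
      · have hn2 : n = 2 := by omega
        subst hn2
        rw [pvPfsLoopA, dif_neg (by norm_num)]
        have hf2 : PySem.Int.floordiv 2 2 = 1 := by decide
        rw [hf2, pvTwoLoopB, dif_neg (by decide)]
        rw [pvPfsLoopA, dif_neg (by norm_num)]
        norm_num
    · have hmod : PySem.Int.mod n 2 ≠ 0 :=
        fun h => hdvd ((PySem.Int.mod_eq_zero_iff_dvd n 2).mp h)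
      rw [pvTwoLoopB, dif_neg (fun h => hmod h.2)]
      by_cases h4 : 4 ≤ n
      · rw [pvPfsLoopA, dif_pos ⟨by norm_num, by norm_num; omega⟩, if_neg hmod]
        norm_num
      · rw [pvPfsLoopA, dif_neg (by norm_num; omega)]
        rw [pvPfsLoopA, dif_neg (by norm_num; omega)]

lemma pvPfsA_two_phase (n : Int) (acc : Int) (hn : 1 ≤ n) :
    pvPfsLoopA n 2 acc = pvPfsLoopA (pvTwoLoopB n acc).1 3 (pvTwoLoopB n acc).2 :=
  pvPfsA_two_phase_aux n.toNat n acc le_rfl hn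

lemma pvPfs_odd_phase (k : Nat) (n d acc : Int) (hk : (n - d).toNat < k)
    (hn : 1 ≤ n) (hodd : ¬ (2 ∣ n)) (hd : 3 ≤ d) (hdodd : ¬ (2 ∣ d)) :
    pvPfsLoopA n d acc = pvPfsLoopB n d acc := by
  induction k generalizing n d acc with
  | zero => omega
  | succ k ih =>
    by_cases hdd : d * d ≤ n
    · have hnd : 6 ≤ n - d := by nlinarith
      by_cases hdvdn : PySem.Int.mod n d = 0
      · have hdvd : d ∣ n := (PySem.Int.mod_eq_zero_iff_dvd n d).mp hdvdn
        have hfd : PySem.Int.floordiv n d = n / d := PySem.Int.floordiv_eq_ediv_of_pos (by omega)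
        rw [pvPfsLoopA, dif_pos ⟨by omega, hdd⟩, if_pos hdvdn,
            pvPfsLoopB, dif_pos ⟨hd, hdd⟩, if_pos hdvdn, hfd]
        obtain ⟨q, hq⟩ : ∃ q, n / d = q := ⟨_, rfl⟩
        rw [hq]
        have hmul : q * d = n := by rw [← hq]; exact Int.ediv_mul_cancel hdvd
        have hq1 : 1 ≤ q := by
          by_contra h
          have h' : q ≤ 0 := by omega
          nlinarith
        have hqlt : q < n := by nlinarith
        have hqodd : ¬ (2 ∣ q) := by
          rintro ⟨c, hc⟩
          exact hodd ⟨c * d, by rw [← hmul, hc]; ring⟩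
        exact ih q d (acc + d) (by omega) hq1 hqodd hd hdodd
      · rw [pvPfsLoopA, dif_pos ⟨by omega, hdd⟩, if_neg hdvdn,
            pvPfsLoopB, dif_pos ⟨hd, hdd⟩, if_neg hdvdn]
        by_cases hdd1 : (d + 1) * (d + 1) ≤ n
        · have hmod1 : PySem.Int.mod n (d + 1) ≠ 0 := by
            intro h
            have hdn : (d + 1) ∣ n := (PySem.Int.mod_eq_zero_iff_dvd n (d + 1)).mp h
            have h2d : (2:Int) ∣ (d + 1) := by omega
            exact hodd (dvd_trans h2d hdn)
          rw [pvPfsLoopA, dif_pos ⟨by omega, hdd1⟩, if_neg hmod1]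
          have hgoal : pvPfsLoopA n (d + 1 + 1) acc = pvPfsLoopB n (d + 2) acc := by
            have h22 : d + 1 + 1 = d + 2 := by ring
            rw [h22]
            exact ih n (d + 2) acc (by omega) hn hodd (by omega) (by omega)
          exact hgoal
        · rw [pvPfsLoopA, dif_neg (fun h => hdd1 h.2)]
          rw [pvPfsLoopB, dif_neg (by
            rintro ⟨-, h2⟩
            nlinarith)]
    · rw [pvPfsLoopA, dif_neg (fun h => hdd h.2), pvPfsLoopB, dif_neg (fun h => hdd h.2)]

lemma pvPfs_eq (n : Int) (hn : 2 ≤ n) : pvPfsA n = pvPfsB n := by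
  unfold pvPfsA pvPfsB
  rw [pvPfsA_two_phase n 0 (by omega)]
  obtain ⟨hm1, hmodd⟩ := pvTwoLoopB_spec n 0 (by omega)
  exact pvPfs_odd_phase (((pvTwoLoopB n 0).1 - 3).toNat + 1) (pvTwoLoopB n 0).1 3
    (pvTwoLoopB n 0).2 (by omega) hm1 hmodd (by norm_num) (by decide)

-- ===== VERDICT (by name: the statement is the Claim_ definition above) =====
theorem ds_multof_pfs_spec : Claim_equal_ds_multof_pfs := by
  intro nMin nMax _ hpre
  unfold Spec_ds_multof_pfs ds_multof_pfs ds_multof_pfs_alt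
  have hfold := PySem.List.foldl_append_if (fun n => PySem.Int.mod (pvDivSumA n) (pvPfsA n) == 0)
    (id : Int → Int) (PySem.List.pyRange nMin (nMax + 1)) ([] : List Int)
  simp only [id_eq, List.map_id, List.nil_append] at hfold
  rw [hfold]
  apply List.filter_congr
  intro n hn
  have hb := PySem.List.mem_pyRange_one.mp hn
  have h2 : 2 ≤ n := by
    rcases hpre with h | h
    · omega
    · omega
  rw [pvDivSum_eq n h2, pvPfs_eq n h2]
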